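-- pv_equiv track=rewrite | github.com/testing71794-cloud/parallel-execution | mailout/send_email.py | _sheet_looks_flow_tabular
-- ===== SOURCE A (Python) =====
-- def _normalize_header(s: str) -> str:
--     return str(s or "").strip().lower().replace("  ", " ")
--
-- def _sheet_looks_flow_tabular(headers: list[str]) -> bool:
--     hlow = { _normalize_header(x) for x in headers if str(x or "").strip() }
--     if "status" not in hlow and "test status" not in hlow:
--         return False
--     if "suite" not in hlow and "test suite" not in hlow and "suite name" not in hlow:
--         return False
--     return any(
--         k in hlow
--         for k in (
--             "flow",
--             "flow name",
--             "test name",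
--         )
--     )
-- ===== SOURCE B (Python) =====
-- def _normalize_header(s: str) -> str:
--     return str(s or "").strip().lower().replace("  ", " ")
--
-- def _sheet_looks_flow_tabular(headers: list[str]) -> bool:
--     has_status = has_suite = has_flow = False
--     for x in headers:
--         if not str(x or "").strip():
--             continue
--         h = _normalize_header(x)
--         if h in ("status", "test status"):
--             has_status = True
--         elif h in ("suite", "test suite", "suite name"):
--             has_suite = True
--         elif h in ("flow", "flow name", "test name"):
--             has_flow = True
--         if has_status and has_suite and has_flow:
--             return True
--     return False
-- ===== Notes on version B (the rewrite author's own statement) =====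
-- stated objective: simpler
-- what changed: Replaced the set-comprehension plus three membership-test passes by a single left-to-right scan that ORs three booleans (status/suite/flow seen) and returns early once all three hold.
import Mathlib
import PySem

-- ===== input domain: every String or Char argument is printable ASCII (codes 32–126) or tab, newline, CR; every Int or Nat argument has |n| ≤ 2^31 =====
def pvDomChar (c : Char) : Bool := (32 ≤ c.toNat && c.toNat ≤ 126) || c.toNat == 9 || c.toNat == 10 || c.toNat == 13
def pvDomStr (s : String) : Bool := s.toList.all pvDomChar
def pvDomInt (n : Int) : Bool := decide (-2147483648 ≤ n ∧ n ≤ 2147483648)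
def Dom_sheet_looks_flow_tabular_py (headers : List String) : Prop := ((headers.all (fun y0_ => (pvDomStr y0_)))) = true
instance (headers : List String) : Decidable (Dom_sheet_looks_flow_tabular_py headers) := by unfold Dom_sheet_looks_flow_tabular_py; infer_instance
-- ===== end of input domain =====

-- B replaces A's set comprehension + three membership passes by one scan that ORs
-- three booleans and stops once all three header kinds were seen (objective: simpler).

-- ===== PORT A =====
-- _normalize_header (shared by both Python files verbatim); on String arguments
-- 'str(s or "")' is s itself when s ≠ "" and "" otherwise, which strip maps to "" either way.
def pvNormalizeHeader (s : String) : String :=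
  PySem.Str.replace (PySem.Str.lower (PySem.Str.strip s)) "  " " "

def sheet_looks_flow_tabular_py (headers : List String) : Bool :=
  let hlow : PySem.Set String :=
    PySem.Set.ofList ((headers.filter (fun x => !(PySem.Str.strip x == ""))).map pvNormalizeHeader)
  if !(PySem.Set.contains hlow "status") && !(PySem.Set.contains hlow "test status") then
    false
  else if !(PySem.Set.contains hlow "suite") && !(PySem.Set.contains hlow "test suite")
          && !(PySem.Set.contains hlow "suite name") then
    false
  else
    (["flow", "flow name", "test name"]).any (fun k => PySem.Set.contains hlow k)

-- ===== PORT B =====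
def flowTabLoop : List String → Bool → Bool → Bool → Bool
  | [], s, u, f => s && u && f
  | x :: rest, s, u, f =>
    if PySem.Str.strip x == "" then
      flowTabLoop rest s u f
    else
      let h := pvNormalizeHeader x
      let t :=
        if (["status", "test status"]).contains h then (true, u, f)
        else if (["suite", "test suite", "suite name"]).contains h then (s, true, f)
        else if (["flow", "flow name", "test name"]).contains h then (s, u, true)
        else (s, u, f)
      if t.1 && t.2.1 && t.2.2 then true else flowTabLoop rest t.1 t.2.1 t.2.2

def sheet_looks_flow_tabular_py_alt (headers : List String) : Bool :=
  flowTabLoop headers false false false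

-- ===== PRECONDITION & SPEC =====
def Spec_sheet_looks_flow_tabular_py (headers : List String) (out : Bool) : Prop := out = sheet_looks_flow_tabular_py_alt headers
instance (headers : List String) (out : Bool) : Decidable (Spec_sheet_looks_flow_tabular_py headers out) := by unfold Spec_sheet_looks_flow_tabular_py; infer_instance

-- ===== CLAIM (what is proved, stated in full; the proofs are below) =====
def Claim_equal_sheet_looks_flow_tabular_py : Prop := ∀ (headers : List String), Dom_sheet_looks_flow_tabular_py headers → Spec_sheet_looks_flow_tabular_py headers (sheet_looks_flow_tabular_py headers)

-- ===== LEMMAS AND PROOFS =====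

-- "x is a non-blank header normalizing into the given key list"
def pvHits (ks : List String) (x : String) : Bool :=
  !(PySem.Str.strip x == "") && ks.contains (pvNormalizeHeader x)

def pvStatusKeys : List String := ["status", "test status"]
def pvSuiteKeys : List String := ["suite", "test suite", "suite name"]
def pvFlowKeys : List String := ["flow", "flow name", "test name"]

lemma flowTabLoop_eq (l : List String) (s u f : Bool) :
    flowTabLoop l s u f =
      ((s || l.any (pvHits pvStatusKeys)) && (u || l.any (pvHits pvSuiteKeys))
        && (f || l.any (pvHits pvFlowKeys))) := by
  induction l generalizing s u f with
  | nil => simp [flowTabLoop]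
  | cons x rest ih =>
    simp only [flowTabLoop]
    cases hb : (PySem.Str.strip x == "") with
    | true => simp [hb, ih, pvHits, List.any_cons]
    | false =>
      cases hcs : (["status", "test status"]).contains (pvNormalizeHeader x) <;>
        cases hcu : (["suite", "test suite", "suite name"]).contains (pvNormalizeHeader x) <;>
          cases hcf : (["flow", "flow name", "test name"]).contains (pvNormalizeHeader x)
      -- the four combinations with two or three 'true' are impossible: the key lists are disjoint
      case false.true.true =>
        simp only [List.contains_eq_mem, List.mem_cons, List.not_mem_nil, or_false,
          decide_eq_true_eq] at hcu hcf
        rcases hcu with h | h | h <;> rw [h] at hcf <;> simp at hcf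
      case true.false.true =>
        simp only [List.contains_eq_mem, List.mem_cons, List.not_mem_nil, or_false,
          decide_eq_true_eq] at hcs hcf
        rcases hcs with h | h <;> rw [h] at hcf <;> simp at hcf
      case true.true.false =>
        simp only [List.contains_eq_mem, List.mem_cons, List.not_mem_nil, or_false,
          decide_eq_true_eq] at hcs hcu
        rcases hcs with h | h <;> rw [h] at hcu <;> simp at hcu
      case true.true.true =>
        simp only [List.contains_eq_mem, List.mem_cons, List.not_mem_nil, or_false,
          decide_eq_true_eq] at hcs hcu
        rcases hcs with h | h <;> rw [h] at hcu <;> simp at hcu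
      all_goals
        cases s <;> cases u <;> cases f <;>
          simp_all [pvHits, pvStatusKeys, pvSuiteKeys, pvFlowKeys, Bool.beq_eq_decide_eq]

lemma set_contains_eq_any (headers : List String) (k : String) :
    PySem.Set.contains
        (PySem.Set.ofList ((headers.filter (fun x => !(PySem.Str.strip x == ""))).map pvNormalizeHeader)) k
      = headers.any (fun x => !(PySem.Str.strip x == "") && (pvNormalizeHeader x == k)) := by
  rw [Bool.eq_iff_iff]
  simp only [PySem.Set.contains, List.contains_eq_mem, decide_eq_true_eq, PySem.Set.mem_ofList,
    List.mem_map, List.mem_filter, List.any_eq_true, Bool.and_eq_true, beq_iff_eq]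
  constructor
  · rintro ⟨x, ⟨hx, hb⟩, rfl⟩; exact ⟨x, hx, hb, rfl⟩
  · rintro ⟨x, hx, hb, rfl⟩; exact ⟨x, ⟨hx, hb⟩, rfl⟩

lemma any_hits (headers : List String) (ks : List String) :
    headers.any (pvHits ks) = ks.any (fun k => headers.any (fun x => !(PySem.Str.strip x == "") && (pvNormalizeHeader x == k))) := by
  rw [Bool.eq_iff_iff]
  simp only [List.any_eq_true, pvHits, Bool.and_eq_true, List.contains_eq_mem,
    decide_eq_true_eq, beq_iff_eq]
  constructor
  · rintro ⟨x, hx, hb, hk⟩; exact ⟨_, hk, x, hx, hb, rfl⟩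
  · rintro ⟨k, hk, x, hx, hb, rfl⟩; exact ⟨x, hx, hb, hk⟩

-- ===== VERDICT (by name: the statement is the Claim_ definition above) =====
theorem sheet_looks_flow_tabular_py_spec : Claim_equal_sheet_looks_flow_tabular_py := by
  intro headers _
  show sheet_looks_flow_tabular_py headers = sheet_looks_flow_tabular_py_alt headers
  unfold sheet_looks_flow_tabular_py sheet_looks_flow_tabular_py_alt
  rw [flowTabLoop_eq]
  simp only [set_contains_eq_any, any_hits, pvStatusKeys, pvSuiteKeys, pvFlowKeys,
    List.any_cons, List.any_nil, Bool.or_false, Bool.false_or]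
  set pS := headers.any (fun x => !(PySem.Str.strip x == "") && (pvNormalizeHeader x == "status"))
  set pTS := headers.any (fun x => !(PySem.Str.strip x == "") && (pvNormalizeHeader x == "test status"))
  set pU1 := headers.any (fun x => !(PySem.Str.strip x == "") && (pvNormalizeHeader x == "suite"))
  set pU2 := headers.any (fun x => !(PySem.Str.strip x == "") && (pvNormalizeHeader x == "test suite"))
  set pU3 := headers.any (fun x => !(PySem.Str.strip x == "") && (pvNormalizeHeader x == "suite name"))
  set pF1 := headers.any (fun x => !(PySem.Str.strip x == "") && (pvNormalizeHeader x == "flow"))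
  set pF2 := headers.any (fun x => !(PySem.Str.strip x == "") && (pvNormalizeHeader x == "flow name"))
  set pF3 := headers.any (fun x => !(PySem.Str.strip x == "") && (pvNormalizeHeader x == "test name"))
  cases pS <;> cases pTS <;> cases pU1 <;> cases pU2 <;> cases pU3 <;> cases pF1 <;> cases pF2 <;> cases pF3 <;> simp
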